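-- pv_equiv track=rewrite | github.com/nachopage92/mpf_v2 | nurbs_meshgen.py | tranpose_array2d
-- ===== SOURCE A (Python) =====
-- def tranpose_array2d(input_list):
--     nrow = len(input_list)
--     ncol = len(input_list[0])
--     ctrlpts2d_transpose = [ [ 0 for i in range(nrow) ] for i in range(ncol) ] # C-like loop
--     for i in range(nrow):
--         for j in range(ncol):
--             ctrlpts2d_transpose[j][i] = input_list[i][j]
--     ctrlpts2d_flatten = []
--     for rows in ctrlpts2d_transpose:
--         for elem in rows:
--             ctrlpts2d_flatten.append(list(elem))
--     return ctrlpts2d_flatten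
-- ===== SOURCE B (Python) =====
-- def tranpose_array2d(input_list):
--     nrow = len(input_list)
--     ncol = len(input_list[0])
--     result = []
--     for j in range(ncol):
--         for i in range(nrow):
--             result.append(list(input_list[i][j]))
--     return result
-- ===== Notes on version B (the rewrite author's own statement) =====
-- stated objective: simpler
-- what changed: B emits the flattened transpose directly with one nested loop in output order, never building or mutating the intermediate ncol-by-nrow transpose matrix that A fills and then re-flattens.
import Mathlib
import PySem

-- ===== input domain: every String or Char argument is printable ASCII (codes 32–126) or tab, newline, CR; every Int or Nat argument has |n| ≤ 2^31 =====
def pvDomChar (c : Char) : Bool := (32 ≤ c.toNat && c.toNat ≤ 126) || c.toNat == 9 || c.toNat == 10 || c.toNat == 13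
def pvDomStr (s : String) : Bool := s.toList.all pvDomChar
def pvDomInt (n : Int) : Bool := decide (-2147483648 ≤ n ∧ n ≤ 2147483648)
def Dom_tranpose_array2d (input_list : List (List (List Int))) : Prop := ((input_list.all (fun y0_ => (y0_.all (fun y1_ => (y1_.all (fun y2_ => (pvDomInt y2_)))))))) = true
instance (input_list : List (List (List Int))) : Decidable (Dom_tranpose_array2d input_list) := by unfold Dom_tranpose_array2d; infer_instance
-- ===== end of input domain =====

-- B fuses A's build-transpose-then-flatten into one nested loop in output order (objective: simpler).

-- ===== PORT A =====
-- A builds an ncol×nrow transpose matrix (Python fills it with the int 0 as a placeholder;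
-- every cell is overwritten before it is read on inputs admitted by Pre_, so the port uses []
-- as the placeholder of the cell type), then flattens it row by row.
def tranpose_array2d (input_list : List (List (List Int))) : List (List Int) :=
  let nrow := input_list.length
  let ncol := (input_list.headD []).length  -- len(input_list[0]); IndexError on [] is excluded by Pre_
  let init : List (List (List Int)) :=
    (List.range ncol).map (fun _ => (List.range nrow).map (fun _ => ([] : List Int)))
  let filled :=
    (List.range nrow).foldl (fun m i =>
      (List.range ncol).foldl (fun m j =>
        m.set j ((m.getD j []).set i ((input_list.getD i []).getD j []))) m) init
  filled.foldl (fun acc rows => rows.foldl (fun acc elem => acc ++ [elem]) acc) []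

-- ===== PORT B =====
def tranpose_array2d_alt (input_list : List (List (List Int))) : List (List Int) :=
  let nrow := input_list.length
  let ncol := (input_list.headD []).length  -- len(input_list[0]); IndexError on [] is excluded by Pre_
  (List.range ncol).foldl (fun acc j =>
    (List.range nrow).foldl (fun acc i =>
      acc ++ [(input_list.getD i []).getD j []]) acc) []

-- ===== PRECONDITION & SPEC =====
-- Pre_ excludes exactly the inputs on which the Python A raises IndexError:
-- the empty list (input_list[0]) and inputs with a row shorter than the first row (input_list[i][j]).
def Pre_tranpose_array2d (input_list : List (List (List Int))) : Prop :=
  input_list ≠ [] ∧ ∀ row ∈ input_list, (input_list.headD []).length ≤ row.length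
instance (input_list : List (List (List Int))) : Decidable (Pre_tranpose_array2d input_list) := by
  unfold Pre_tranpose_array2d; infer_instance
def pvWitness_tranpose_array2d : List (List (List Int)) := [[[1, 2], [3]], [[4], [5, 6]]]
def Spec_tranpose_array2d (input_list : List (List (List Int))) (out : List (List Int)) : Prop := out = tranpose_array2d_alt input_list
instance (input_list : List (List (List Int))) (out : List (List Int)) : Decidable (Spec_tranpose_array2d input_list out) := by unfold Spec_tranpose_array2d; infer_instance

-- ===== CLAIM (what is proved, stated in full; the proofs are below) =====
def Claim_equal_tranpose_array2d : Prop := ∀ (input_list : List (List (List Int))), Dom_tranpose_array2d input_list → Pre_tranpose_array2d input_list → Spec_tranpose_array2d input_list (tranpose_array2d input_list)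

-- ===== LEMMAS AND PROOFS =====

-- appending elements one by one is appending the list
theorem pv_foldl_append_one {α : Type} (l : List α) (acc : List α) :
    l.foldl (fun acc e => acc ++ [e]) acc = acc ++ l := by
  induction l generalizing acc with
  | nil => simp
  | cons x xs ih => rw [List.foldl_cons, ih]; simp

-- B's inner loop appends the j-th column
theorem pv_b_inner (a : Nat → Nat → List Int) (n : Nat) (j : Nat) (acc : List (List Int)) :
    (List.range n).foldl (fun acc i => acc ++ [a i j]) acc
      = acc ++ (List.range n).map (fun i => a i j) := by
  induction n generalizing acc with
  | zero => simp
  | succ n ih =>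
    rw [List.range_succ, List.foldl_append, List.foldl_cons, List.foldl_nil, ih]
    simp

-- B's double loop is the flatMap of columns
theorem pv_b_eq (a : Nat → Nat → List Int) (ncol nrow : Nat) :
    (List.range ncol).foldl (fun acc j =>
        (List.range nrow).foldl (fun acc i => acc ++ [a i j]) acc) []
      = (List.range ncol).flatMap (fun j => (List.range nrow).map (fun i => a i j)) := by
  induction ncol with
  | zero => simp
  | succ n ih =>
    rw [List.range_succ, List.foldl_append, List.foldl_cons, List.foldl_nil, ih,
      pv_b_inner, List.flatMap_append]
    simp

-- A's inner mutation pass over range n: sets entry i of the first n rows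
theorem pv_a_inner_aux (a : Nat → Nat → List Int) (i : Nat) :
    ∀ (n : Nat) (m : List (List (List Int))),
      (List.range n).foldl (fun m j => m.set j ((m.getD j []).set i (a i j))) m
        = m.mapIdx (fun j row => if j < n then row.set i (a i j) else row) := by
  intro n
  induction n with
  | zero =>
    intro m
    apply List.ext_getElem
    · simp
    · intro k h1 h2
      simp [List.getElem_mapIdx]
  | succ n ih =>
    intro m
    rw [List.range_succ, List.foldl_append, List.foldl_cons, List.foldl_nil, ih m]
    by_cases hn : n < m.length
    · apply List.ext_getElem
      · simp
      · intro k h1 h2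
        have hk : k < m.length := by simpa using h2
        have hklen : k < (List.mapIdx (fun j row => if j < n then row.set i (a i j) else row) m).length := by
          simpa using hk
        rw [List.getElem_set, List.getElem_mapIdx]
        by_cases hkn : n = k
        · subst hkn
          have hgetD : (List.mapIdx (fun j row => if j < n then row.set i (a i j) else row) m).getD n [] = m[n] := by
            simp [List.getD_eq_getElem?_getD, List.getElem?_eq_getElem hklen, List.getElem_mapIdx]
          rw [if_pos rfl, hgetD]
          simp
        · rw [if_neg hkn, List.getElem_mapIdx]
          have heq : (k < n + 1) = (k < n) := by
            apply propext; omega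
          simp only [heq]
    · have hn' : m.length ≤ n := Nat.le_of_not_lt hn
      rw [List.set_eq_of_length_le (by simpa using hn')]
      apply List.ext_getElem
      · simp
      · intro k h1 h2
        have hk : k < m.length := by simpa using h2
        rw [List.getElem_mapIdx, List.getElem_mapIdx]
        have h1' : k < n := by omega
        simp [h1', Nat.lt_succ_of_lt h1']

-- a matrix written as a map over range: mapIdx collapses to map
theorem pv_mapIdx_map_range {α : Type} (f : Nat → α → α) (g : Nat → α) (n : Nat) :
    List.mapIdx f ((List.range n).map g) = (List.range n).map (fun j => f j (g j)) := by
  apply List.ext_getElem <;> simp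

-- A's outer loop: after k row-passes, row j of the matrix holds the first k entries of column j
theorem pv_a_outer (a : Nat → Nat → List Int) (ncol nrow : Nat) (k : Nat) (hk : k ≤ nrow) :
    (List.range k).foldl (fun m i =>
        (List.range ncol).foldl (fun m j =>
          m.set j ((m.getD j []).set i (a i j))) m)
      ((List.range ncol).map (fun _ => (List.range nrow).map (fun _ => ([] : List Int))))
      = (List.range ncol).map (fun j =>
          (List.range k).map (fun i => a i j) ++ List.replicate (nrow - k) ([] : List Int)) := by
  induction k with
  | zero => simp [List.map_const']
  | succ k ih =>
    have hk' : k ≤ nrow := by omega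
    rw [List.range_succ, List.foldl_append, List.foldl_cons, List.foldl_nil, ih hk']
    rw [pv_a_inner_aux a k ncol _, pv_mapIdx_map_range]
    apply List.ext_getElem
    · simp
    intro j h1 h2
    have hj : j < ncol := by simpa using h1
    simp only [List.getElem_map, List.getElem_range]
    rw [if_pos hj]
    have hlen : ((List.range k).map (fun i => a i j)).length = k := by simp
    rw [List.set_append_right _ _ (by simp), hlen, Nat.sub_self]
    have hrep : nrow - k = (nrow - (k + 1)) + 1 := by omega
    rw [hrep, List.replicate_succ, List.set_cons_zero, List.map_append]
    simp

-- A's flatten loop is List.flatten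
theorem pv_flatten (ls : List (List (List Int))) (acc : List (List Int)) :
    ls.foldl (fun acc rows => rows.foldl (fun acc elem => acc ++ [elem]) acc) acc
      = acc ++ ls.flatten := by
  induction ls generalizing acc with
  | nil => simp
  | cons x xs ih =>
    rw [List.foldl_cons, pv_foldl_append_one, ih]
    simp

-- ===== VERDICT (by name: the statement is the Claim_ definition above) =====
theorem tranpose_array2d_spec : Claim_equal_tranpose_array2d := by
  intro input_list _ _
  unfold Spec_tranpose_array2d tranpose_array2d tranpose_array2d_alt
  simp only
  rw [pv_a_outer (fun i j => (input_list.getD i []).getD j []) _ _ _ (le_refl _)]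
  rw [pv_flatten, pv_b_eq]
  simp [List.flatMap]
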